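-- pv_equiv track=rewrite | github.com/LeeTaeSung0628/Baekjoon-Programmers | 프로그래머스/lv1/92334. 신고 결과 받기/신고 결과 받기.py | solution
-- ===== SOURCE A (Python) =====
-- def solution(idl, rep, k):
--
--     dic = {}
--     cnt = 0
--     for item in idl:
--         dic[item] = cnt
--         cnt+=1
--
--     ss_list = [[] for _ in range(len(idl))]
--     for item in rep:
--         #ss => 신고자
--         #nn => 당한사람
--         ss, nn = item.split()
--         ss_list[dic[nn]].append(dic[ss])
--
--
--     mail_list = [0] * len(idl)
--     for item in ss_list:
--         item = list(set(item)) # 중복제거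
--         if len(item) >= k:
--             for i in item:
--                 mail_list[i] += 1
--
--
--     answer = mail_list
--     return answer
-- ===== SOURCE B (Python) =====
-- def solution(idl, rep, k):
--     dic = {}
--     for i, name in enumerate(idl):
--         dic[name] = i
--     pairs = []
--     for r in rep:
--         ss, nn = r.split()
--         pairs.append((dic[ss], dic[nn]))
--     pairs.sort()
--     count = [0] * len(idl)
--     prev = None
--     for p in pairs:
--         if p != prev:
--             count[p[1]] += 1
--             prev = p
--     mail = [0] * len(idl)
--     prev = None
--     for p in pairs:
--         if p != prev:
--             if count[p[1]] >= k:
--                 mail[p[0]] += 1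
--             prev = p
--     return mail
-- ===== Notes on version B (the rewrite author's own statement) =====
-- stated objective: alternative
-- what changed: A groups reports into per-target bucket lists and deduplicates each bucket with a hash set before awarding mails; B uses no sets or buckets at all: it parses all reports into (reporter,target) index pairs, sorts them so duplicates become adjacent, and deduplicates by comparing each pair with its predecessor in two flat sentinel-scans (one counting distinct reports per target, one awarding mails).
import Mathlib
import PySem

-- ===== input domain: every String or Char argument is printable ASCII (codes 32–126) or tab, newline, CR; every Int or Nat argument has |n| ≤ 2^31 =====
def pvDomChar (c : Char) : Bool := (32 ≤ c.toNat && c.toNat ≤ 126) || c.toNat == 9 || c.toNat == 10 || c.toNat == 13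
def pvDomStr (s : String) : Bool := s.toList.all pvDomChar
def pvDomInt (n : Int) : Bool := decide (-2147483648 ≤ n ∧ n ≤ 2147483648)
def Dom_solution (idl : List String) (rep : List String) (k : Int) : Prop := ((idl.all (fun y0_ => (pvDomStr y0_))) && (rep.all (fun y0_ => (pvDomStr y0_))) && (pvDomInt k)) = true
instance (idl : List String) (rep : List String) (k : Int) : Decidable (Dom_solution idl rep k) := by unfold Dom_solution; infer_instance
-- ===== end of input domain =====

-- B replaces A's per-target bucket lists and per-bucket set() deduplication by a sort of the
-- (reporter, target) index pairs followed by two flat previous-element dedup scans (objective: alternative).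

-- ===== PORT A =====
-- dic = {}; cnt = 0; for item in idl: dic[item] = cnt; cnt += 1
def pvDicA (idl : List String) : PySem.Dict String Int :=
  (idl.foldl (fun (p : PySem.Dict String Int × Int) item => (p.1.insert item p.2, p.2 + 1))
    (PySem.Dict.empty, 0)).1

-- ss, nn = item.split(); ss_list[dic[nn]].append(dic[ss])
-- (a report of ≠ 2 words raises ValueError, an unknown id raises KeyError: such inputs are outside Pre_solution)
def pvStepA (dic : PySem.Dict String Int) (sl : List (List Int)) (item : String) : List (List Int) :=
  match PySem.Str.split₀ item with
  | [ss, nn] =>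
      PySem.List.pySetD sl (dic.getD nn 0)
        (PySem.List.pyGetD sl (dic.getD nn 0) [] ++ [dic.getD ss 0])
  | _ => sl

-- item = list(set(item)); if len(item) >= k: for i in item: mail_list[i] += 1
-- (the set's iteration order only permutes commuting += updates, so the resulting list is order-independent)
def pvMailStepA (k : Int) (mail : List Int) (item : List Int) : List Int :=
  let st := PySem.Set.ofList item
  if k ≤ PySem.List.len st then
    st.foldl (fun m i => PySem.List.pySetD m i (PySem.List.pyGetD m i 0 + 1)) mail
  else mail

def solution (idl : List String) (rep : List String) (k : Int) : List Int :=
  let dic := pvDicA idl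
  let ssList := rep.foldl (pvStepA dic) (List.replicate idl.length ([] : List Int))
  ssList.foldl (pvMailStepA k) (List.replicate idl.length (0 : Int))

-- ===== PORT B =====
def solution_alt (idl : List String) (rep : List String) (k : Int) : List Int :=
  -- dic = {}; for i, name in enumerate(idl): dic[name] = i
  let dic := (PySem.List.enumerate idl).foldl
    (fun (d : PySem.Dict String Int) p => d.insert p.2 p.1) PySem.Dict.empty
  -- pairs = []; for r in rep: ss, nn = r.split(); pairs.append((dic[ss], dic[nn]))
  let pairs := rep.foldl (fun (ps : List (Int × Int)) r =>
      match PySem.Str.split₀ r with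
      | [ss, nn] => ps ++ [(dic.getD ss 0, dic.getD nn 0)]
      | _ => ps) []
  -- pairs.sort()   (Python compares int tuples lexicographically: first component, then second)
  let sp := PySem.List.sorted2 pairs (·.1) (·.2)
  -- count = [0]*len(idl); prev = None; for p in pairs: if p != prev: count[p[1]] += 1; prev = p
  let count := (sp.foldl (fun (st : List Int × Option (Int × Int)) p =>
      if some p ≠ st.2 then
        (PySem.List.pySetD st.1 p.2 (PySem.List.pyGetD st.1 p.2 0 + 1), some p)
      else st)
      (List.replicate idl.length (0 : Int), none)).1
  -- mail = [0]*len(idl); prev = None; for p in pairs: if p != prev: (if count[p[1]] >= k: mail[p[0]] += 1); prev = p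
  (sp.foldl (fun (st : List Int × Option (Int × Int)) p =>
      if some p ≠ st.2 then
        ((if k ≤ PySem.List.pyGetD count p.2 0 then
            PySem.List.pySetD st.1 p.1 (PySem.List.pyGetD st.1 p.1 0 + 1)
          else st.1), some p)
      else st)
      (List.replicate idl.length (0 : Int), none)).1

-- ===== PRECONDITION & SPEC =====
-- Pre_ excludes exactly the inputs on which the Python raises: a report that does not split
-- into exactly two words (ValueError on unpacking) or that names an id absent from idl (KeyError).
def Pre_solution (idl : List String) (rep : List String) (k : Int) : Prop :=
  ∀ r ∈ rep, (PySem.Str.split₀ r).length = 2 ∧ ∀ t ∈ PySem.Str.split₀ r, t ∈ idl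
instance (idl : List String) (rep : List String) (k : Int) : Decidable (Pre_solution idl rep k) := by
  unfold Pre_solution; infer_instance

def pvWitness_solution : List String × List String × Int :=
  (["muzi", "frodo"], ["muzi frodo", "frodo muzi"], 1)

def Spec_solution (idl : List String) (rep : List String) (k : Int) (out : List Int) : Prop := out = solution_alt idl rep k
instance (idl : List String) (rep : List String) (k : Int) (out : List Int) : Decidable (Spec_solution idl rep k out) := by unfold Spec_solution; infer_instance

-- ===== CLAIM (what is proved, stated in full; the proofs are below) =====
def Claim_equal_solution : Prop := ∀ (idl : List String) (rep : List String) (k : Int), Dom_solution idl rep k → Pre_solution idl rep k → Spec_solution idl rep k (solution idl rep k)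

-- ===== LEMMAS AND PROOFS =====

-- the pair (dic[ss], dic[nn]) read off one report, `none` when the report has ≠ 2 words
def pvParse (dic : PySem.Dict String Int) (r : String) : Option (Int × Int) :=
  match PySem.Str.split₀ r with
  | [ss, nn] => some (dic.getD ss 0, dic.getD nn 0)
  | _ => none

-- the list of (reporter, target) index pairs, in report order (duplicates kept)
def pvPairs (idl : List String) (rep : List String) : List (Int × Int) :=
  rep.filterMap (pvParse (pvDicA idl))

-- B's dict (built from enumerate) is A's dict (built with a running counter)
theorem pvDicB_eq (idl : List String) (d : PySem.Dict String Int) (c : Int) :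
    (PySem.List.enumerate idl c).foldl (fun (d : PySem.Dict String Int) p => d.insert p.2 p.1) d
      = (idl.foldl (fun (p : PySem.Dict String Int × Int) item => (p.1.insert item p.2, p.2 + 1)) (d, c)).1 := by
  induction idl generalizing d c with
  | nil => simp [PySem.List.enumerate_nil]
  | cons x xs ih => simp [PySem.List.enumerate_cons, List.foldl_cons, ih]

-- B's report loop accumulates exactly the parsed pairs
theorem pvPairsB_eq (dic : PySem.Dict String Int) (rep : List String) (acc : List (Int × Int)) :
    rep.foldl (fun (ps : List (Int × Int)) r =>
        match PySem.Str.split₀ r with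
        | [ss, nn] => ps ++ [(dic.getD ss 0, dic.getD nn 0)]
        | _ => ps) acc
      = acc ++ rep.filterMap (pvParse dic) := by
  induction rep generalizing acc with
  | nil => simp
  | cons r t ih =>
      rw [List.foldl_cons, List.filterMap_cons]
      rcases hs : PySem.Str.split₀ r with _ | ⟨a, _ | ⟨b, _ | _⟩⟩ <;>
        simp [pvParse, hs, ih, List.append_assoc]

-- every value stored in (or defaulted from) the id dict is in [0, n) once 0 < n
theorem pvDicFold_bound (idl : List String) (d : PySem.Dict String Int) (c m : Int)
    (hd : ∀ t, 0 ≤ d.getD t 0 ∧ d.getD t 0 < m) (hc : 0 ≤ c) (hm : c + idl.length ≤ m) (s : String) :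
    0 ≤ ((idl.foldl (fun (p : PySem.Dict String Int × Int) item => (p.1.insert item p.2, p.2 + 1)) (d, c)).1.getD s 0)
    ∧ ((idl.foldl (fun (p : PySem.Dict String Int × Int) item => (p.1.insert item p.2, p.2 + 1)) (d, c)).1.getD s 0) < m := by
  induction idl generalizing d c with
  | nil => simpa using hd s
  | cons x xs ih =>
      simp only [List.foldl_cons, List.length_cons] at *
      apply ih
      · intro t
        rw [PySem.Dict.getD_insert]
        split
        · exact ⟨hc, by push_cast at hm; omega⟩
        · exact hd t
      · omega
      · push_cast at hm ⊢; omega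

theorem pvDicA_bound (idl : List String) (h : 0 < idl.length) (s : String) :
    0 ≤ (pvDicA idl).getD s 0 ∧ (pvDicA idl).getD s 0 < (idl.length : Int) := by
  apply pvDicFold_bound
  · intro t; simp [PySem.Dict.getD_empty]; exact_mod_cast h
  · exact le_refl 0
  · omega

theorem pvPairs_bound (idl rep : List String) (h : 0 < idl.length) :
    ∀ p ∈ pvPairs idl rep,
      (0 ≤ p.1 ∧ p.1 < (idl.length : Int)) ∧ (0 ≤ p.2 ∧ p.2 < (idl.length : Int)) := by
  intro p hp
  obtain ⟨r, _, hr⟩ := List.mem_filterMap.1 hp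
  unfold pvParse at hr
  rcases hs : PySem.Str.split₀ r with _ | ⟨a, _ | ⟨b, _ | ⟨x, xs⟩⟩⟩ <;> rw [hs] at hr
  · exact absurd hr (by simp)
  · exact absurd hr (by simp)
  · obtain rfl : ((pvDicA idl).getD a 0, (pvDicA idl).getD b 0) = p := by simpa using hr
    exact ⟨pvDicA_bound idl h a, pvDicA_bound idl h b⟩
  · exact absurd hr (by simp)

-- fold steps preserve length ⇒ the fold preserves length
theorem pvFoldlLen {α β : Type} (f : List α → β → List α) (h : ∀ m x, (f m x).length = m.length)
    (l : List β) (m : List α) : (l.foldl f m).length = m.length := by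
  induction l generalizing m with
  | nil => rfl
  | cons x xs ih => rw [List.foldl_cons, ih, h]

-- the counting fold: incrementing at in-range slots i ∈ l adds (count of j in l) at slot j
theorem pvIncFold (l : List Int) (m : List Int)
    (hl : ∀ i ∈ l, 0 ≤ i ∧ i < (m.length : Int)) (j : Nat) (hj : j < m.length) :
    (l.foldl (fun m i => PySem.List.pySetD m i (PySem.List.pyGetD m i 0 + 1)) m).getD j 0
      = m.getD j 0 + (l.count (j : Int) : Int) := by
  induction l generalizing m with
  | nil => simp
  | cons i l ih =>
      obtain ⟨hi0, hilt⟩ := hl i (by simp)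
      rw [List.foldl_cons]
      rw [PySem.List.pySetD_of_nonneg _ _ hi0]
      rw [ih (m.set i.toNat (PySem.List.pyGetD m i 0 + 1))
            (by intro x hx; have := hl x (by simp [hx]); simpa using this)
            (by simpa using hj)]
      rw [PySem.List.pyGetD_eq_getElem _ _ hi0 (by simpa using hilt)]
      rw [List.getD_eq_getElem _ _ hj, List.getD_eq_getElem _ _ (by simpa using hj)]
      rw [List.getElem_set]
      rw [List.count_cons]
      by_cases hij : i.toNat = j
      · have : i = (j : Int) := by omega
        simp [this]
        ring
      · have : ¬ (i == (j : Int)) := by simp; omega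
        simp [hij, this]

theorem pvIncFoldLen (l : List Int) (m : List Int) :
    (l.foldl (fun m i => PySem.List.pySetD m i (PySem.List.pyGetD m i 0 + 1)) m).length = m.length :=
  pvFoldlLen _ (fun m x => PySem.List.length_pySetD m x _) l m

theorem pvMailStepALen (k : Int) (mail item : List Int) :
    (pvMailStepA k mail item).length = mail.length := by
  unfold pvMailStepA
  simp only []
  split
  · exact pvIncFoldLen _ _
  · rfl

-- A's report loop is the bucket fold over the parsed pairs
theorem pvSsList_eq (idl rep : List String) (init : List (List Int)) :
    rep.foldl (pvStepA (pvDicA idl)) init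
      = (pvPairs idl rep).foldl
          (fun sl p => PySem.List.pySetD sl p.2 (PySem.List.pyGetD sl p.2 [] ++ [p.1])) init := by
  unfold pvPairs
  rw [List.foldl_filterMap]
  apply PySem.List.foldl_congr_mem
  intro acc r _
  unfold pvStepA pvParse
  rcases PySem.Str.split₀ r with _ | ⟨a, _ | ⟨b, _ | _⟩⟩ <;> rfl

-- bucket t of A's ss_list: the reporters of target t, in report order, duplicates kept
theorem pvBucket (P : List (Int × Int)) (sl : List (List Int))
    (h : ∀ p ∈ P, 0 ≤ p.2 ∧ p.2 < (sl.length : Int)) (t : Nat) (ht : t < sl.length) :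
    (P.foldl (fun sl p => PySem.List.pySetD sl p.2 (PySem.List.pyGetD sl p.2 [] ++ [p.1])) sl).getD t []
      = sl.getD t [] ++ (P.filter (fun p => p.2 == (t : Int))).map (·.1) := by
  induction P generalizing sl with
  | nil => simp
  | cons p P ih =>
      obtain ⟨h0, hlt⟩ := h p (by simp)
      rw [List.foldl_cons]
      rw [PySem.List.pySetD_of_nonneg _ _ h0,
          PySem.List.pyGetD_eq_getElem _ _ h0 (by simpa using hlt)]
      rw [ih _ (by intro x hx; have := h x (by simp [hx]); simpa using this) (by simpa using ht)]
      rw [List.getD_eq_getElem _ _ ht, List.getD_eq_getElem _ _ (by simpa using ht), List.getElem_set]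
      rw [List.filter_cons]
      by_cases hpt : p.2.toNat = t
      · have hbe : (p.2 == (t : Int)) = true := by simp; omega
        simp [hpt, hbe, List.append_assoc]
      · have hbe : ¬ ((p.2 == (t : Int)) = true) := by simp; omega
        simp [hpt, hbe]

-- dedup commutes with filter
theorem pvOfListFilter {α : Type} [BEq α] [LawfulBEq α] (l : List α) (q : α → Bool) :
    (PySem.Set.ofList l).filter q = PySem.Set.ofList (l.filter q) := by
  induction l using List.reverseRecOn with
  | nil => rfl
  | append_singleton l x ih =>
      rw [List.filter_append, PySem.Set.ofList_append_singleton, PySem.Set.add_eq_ite]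
      by_cases hx : x ∈ PySem.Set.ofList l
      · have hxl : x ∈ l := (PySem.Set.mem_ofList l x).1 hx
        simp only [hx, if_pos]
        rw [ih]
        by_cases hq : q x
        · simp only [List.filter_cons, hq, List.filter_nil, if_pos]
          rw [PySem.Set.ofList_append_singleton, PySem.Set.add_of_mem]
          exact (PySem.Set.mem_ofList _ _).2 (List.mem_filter.2 ⟨hxl, hq⟩)
        · simp [hq]
      · simp only [hx, if_neg, not_false_iff]
        rw [List.filter_append, ih]
        by_cases hq : q x
        · simp only [List.filter_cons, hq, List.filter_nil, if_pos]
          rw [PySem.Set.ofList_append_singleton, PySem.Set.add_of_not_mem]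
          intro hc
          exact hx ((PySem.Set.mem_ofList _ _).2 (List.mem_of_mem_filter ((PySem.Set.mem_ofList _ _).1 hc)))
        · simp [hq]

-- dedup commutes with .map fst on a list of pairs with constant second component
theorem pvOfListMapFst (l : List (Int × Int)) (c : Int) (h : ∀ p ∈ l, p.2 = c) :
    PySem.Set.ofList (l.map (·.1)) = (PySem.Set.ofList l).map (·.1) := by
  induction l using List.reverseRecOn with
  | nil => rfl
  | append_singleton l p ih =>
      have hl : ∀ q ∈ l, q.2 = c := fun q hq => h q (by simp [hq])
      have hp : p.2 = c := h p (by simp)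
      rw [List.map_append, List.map_singleton, PySem.Set.ofList_append_singleton,
          PySem.Set.ofList_append_singleton, PySem.Set.add_eq_ite, PySem.Set.add_eq_ite]
      have hmem : p.1 ∈ PySem.Set.ofList (l.map (·.1)) ↔ p ∈ PySem.Set.ofList l := by
        rw [PySem.Set.mem_ofList, PySem.Set.mem_ofList, List.mem_map]
        constructor
        · rintro ⟨q, hq, hfst⟩
          have : q = p := Prod.ext hfst (by rw [hl q hq, hp])
          rwa [← this]
        · intro hpl; exact ⟨p, hpl, rfl⟩
      by_cases hin : p ∈ PySem.Set.ofList l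
      · rw [if_pos hin, if_pos (hmem.2 hin), ih hl]
      · rw [if_neg hin, if_neg (fun hc => hin (hmem.1 hc)), ih hl, List.map_append, List.map_singleton]

-- A's mail loop over bucket lists, slot by slot
theorem pvMailFoldA (k : Int) (g : Nat → List Int) (ts : List Nat) (mail : List Int)
    (hg : ∀ t ∈ ts, ∀ i ∈ PySem.Set.ofList (g t), 0 ≤ i ∧ i < (mail.length : Int))
    (j : Nat) (hj : j < mail.length) :
    (ts.foldl (fun m t => pvMailStepA k m (g t)) mail).getD j 0
      = mail.getD j 0 +
        ((ts.map (fun t =>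
          if k ≤ ((PySem.Set.ofList (g t)).length : Int) ∧ (j : Int) ∈ PySem.Set.ofList (g t)
          then (1 : Int) else 0)).sum) := by
  induction ts generalizing mail with
  | nil => simp
  | cons t ts ih =>
      rw [List.foldl_cons, List.map_cons, List.sum_cons]
      have hstep := pvMailStepALen k mail (g t)
      rw [ih (pvMailStepA k mail (g t))
            (by intro u hu i hi
                have := hg u (by simp [hu]) i hi
                rwa [hstep])
            (by rwa [hstep])]
      have hone : (pvMailStepA k mail (g t)).getD j 0
          = mail.getD j 0 + (if k ≤ ((PySem.Set.ofList (g t)).length : Int) ∧ (j : Int) ∈ PySem.Set.ofList (g t) then (1 : Int) else 0) := by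
        unfold pvMailStepA
        simp only [PySem.List.len_eq]
        by_cases hk : k ≤ ((PySem.Set.ofList (g t)).length : Int)
        · rw [if_pos hk]
          rw [pvIncFold _ _ (hg t (by simp)) j hj]
          by_cases hm : (j : Int) ∈ PySem.Set.ofList (g t)
          · rw [List.count_eq_one_of_mem (PySem.Set.nodup_ofList _) hm, if_pos ⟨hk, hm⟩]
            norm_num
          · rw [List.count_eq_zero.2 hm, if_neg (by tauto)]
            norm_num
        · rw [if_neg hk, if_neg (by tauto)]
          norm_num
      rw [hone]; ring

-- ---- the sort + previous-element dedup machinery of B ----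

-- Python's tuple sort is PySem's sorted with the lexicographic key
theorem pvSorted2_eq (xs : List (Int × Int)) :
    PySem.List.sorted2 xs (·.1) (·.2) = PySem.List.sorted xs (fun p => toLex p) false := by
  unfold PySem.List.sorted2 PySem.List.sorted
  have hbe : (fun (a b : Int × Int) => decide (a.1 < b.1) || (!decide (b.1 < a.1) && decide (a.2 < b.2)))
      = (fun (a b : Int × Int) => decide (toLex a < toLex b)) := by
    funext a b
    have h : decide (toLex a < toLex b) = decide (a.1 < b.1 ∨ a.1 = b.1 ∧ a.2 < b.2) :=
      decide_eq_decide.mpr (Prod.Lex.toLex_lt_toLex (x := a) (y := b))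
    rw [h]
    by_cases h1 : a.1 < b.1 <;> by_cases h2 : b.1 < a.1 <;> by_cases h3 : a.2 < b.2 <;>
      simp [h1, h2, h3] <;> omega
  simp only [Bool.false_eq_true, if_neg, not_false_iff, hbe]

-- the list a previous-element dedup scan actually processes
def pvDda {α : Type} [DecidableEq α] : Option α → List α → List α
  | _, [] => []
  | pr, a :: t => if some a = pr then pvDda pr t else a :: pvDda (some a) t

-- a scan guarded by `p != prev` is a plain fold over pvDda
theorem pvPrevFold {α σ : Type} [DecidableEq α] (f : σ → α → σ) (L : List α) (s : σ) (pr : Option α) :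
    (L.foldl (fun (st : σ × Option α) p => if some p ≠ st.2 then (f st.1 p, some p) else st) (s, pr)).1
      = (pvDda pr L).foldl f s := by
  induction L generalizing s pr with
  | nil => rfl
  | cons a t ih =>
      rw [List.foldl_cons]
      by_cases h : some a = pr
      · rw [pvDda, if_pos h]
        simpa [h] using ih s pr
      · rw [pvDda, if_neg h]
        rw [List.foldl_cons]
        simpa [h] using ih (f s a) (some a)

theorem pvDda_subset {α : Type} [DecidableEq α] (pr : Option α) (L : List α) :
    ∀ x ∈ pvDda pr L, x ∈ L := by
  induction L generalizing pr with
  | nil => simp [pvDda]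
  | cons a t ih =>
      intro x hx
      rw [pvDda] at hx
      split at hx
      · exact List.mem_cons_of_mem a (ih pr x hx)
      · rcases List.mem_cons.1 hx with rfl | hx
        · exact List.mem_cons_self
        · exact List.mem_cons_of_mem a (ih (some a) x hx)

theorem pvDda_mem {α : Type} [DecidableEq α] (pr : Option α) (L : List α) :
    ∀ x ∈ L, x ∈ pvDda pr L ∨ some x = pr := by
  induction L generalizing pr with
  | nil => simp
  | cons a t ih =>
      intro x hx
      rw [pvDda]
      by_cases h : some a = pr
      · rw [if_pos h]
        rcases List.mem_cons.1 hx with rfl | hx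
        · exact Or.inr h
        · exact ih pr x hx
      · rw [if_neg h]
        rcases List.mem_cons.1 hx with rfl | hx
        · exact Or.inl List.mem_cons_self
        · rcases ih (some a) x hx with h1 | h1
          · exact Or.inl (List.mem_cons_of_mem a h1)
          · exact Or.inl (by rw [Option.some_inj.1 h1]; exact List.mem_cons_self)

theorem pvDda_mem_none {α : Type} [DecidableEq α] (L : List α) (x : α) :
    x ∈ pvDda (none : Option α) L ↔ x ∈ L :=
  ⟨pvDda_subset none L x, fun h => (pvDda_mem none L x h).resolve_right (by simp)⟩

-- on a key-sorted list with an injective key, the previous-element dedup yields a Nodup list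
theorem pvDda_nodup {α κ : Type} [DecidableEq α] [LinearOrder κ] (key : α → κ)
    (hinj : ∀ a b, key a = key b → a = b) (L : List α) (pr : Option α)
    (hPW : L.Pairwise (fun x y => key x ≤ key y))
    (hpr : ∀ x ∈ L, ∀ p, pr = some p → key p ≤ key x) :
    (pvDda pr L).Nodup ∧ ∀ x ∈ pvDda pr L, pr ≠ some x := by
  induction L generalizing pr with
  | nil => simp [pvDda]
  | cons a t ih =>
      obtain ⟨hhead, htail⟩ := List.pairwise_cons.1 hPW
      by_cases h : some a = pr
      · rw [pvDda, if_pos h]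
        have := ih pr htail (fun x hx p hp => hpr x (List.mem_cons_of_mem a hx) p hp)
        refine ⟨this.1, fun x hx => ?_⟩
        exact this.2 x hx
      · rw [pvDda, if_neg h]
        have hih := ih (some a) htail (fun x hx p hp => by
          obtain rfl : a = p := Option.some_inj.1 hp
          exact hhead x hx)
        have hnotmem : a ∉ pvDda (some a) t := fun hc => hih.2 a hc rfl
        refine ⟨List.nodup_cons.2 ⟨hnotmem, hih.1⟩, ?_⟩
        intro x hx hc
        rcases List.mem_cons.1 hx with rfl | hx
        · exact h hc.symm
        · -- x ∈ pvDda (some a) t, pr = some x; then key x ≤ key a ≤ key x forces x = a, contradiction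
          have hxt : x ∈ t := pvDda_subset (some a) t x hx
          have h1 : key x ≤ key a := hpr a List.mem_cons_self x hc
          have h2 : key a ≤ key x := hhead x hxt
          have : x = a := hinj x a (le_antisymm h1 h2)
          rw [this] at hx
          exact hnotmem hx

-- the heart of the equivalence: A's bucket-then-dedup mail loop equals B's two dedup scans
-- over any Nodup list D holding exactly the distinct parsed pairs
theorem pvCore (P D : List (Int × Int)) (n : Nat)
    (hPb : ∀ p ∈ P, (0 ≤ p.1 ∧ p.1 < (n : Int)) ∧ (0 ≤ p.2 ∧ p.2 < (n : Int)))
    (hD : D.Nodup) (hmem : ∀ p, p ∈ D ↔ p ∈ P) (k : Int) :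
    (P.foldl (fun sl p => PySem.List.pySetD sl p.2 (PySem.List.pyGetD sl p.2 [] ++ [p.1]))
        (List.replicate n ([] : List Int))).foldl (pvMailStepA k) (List.replicate n (0 : Int))
      = D.foldl
          (fun m p =>
            if k ≤ PySem.List.pyGetD
                (D.foldl
                  (fun c p => PySem.List.pySetD c p.2 (PySem.List.pyGetD c p.2 0 + 1))
                  (List.replicate n (0 : Int))) p.2 0 then
              PySem.List.pySetD m p.1 (PySem.List.pyGetD m p.1 0 + 1)
            else m)
          (List.replicate n (0 : Int)) := by
  set E := PySem.Set.ofList P with hE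
  have hEb : ∀ p ∈ E, (0 ≤ p.1 ∧ p.1 < (n : Int)) ∧ (0 ≤ p.2 ∧ p.2 < (n : Int)) :=
    fun p hp => hPb p ((PySem.Set.mem_ofList _ _).1 hp)
  have hDb : ∀ p ∈ D, (0 ≤ p.1 ∧ p.1 < (n : Int)) ∧ (0 ≤ p.2 ∧ p.2 < (n : Int)) :=
    fun p hp => hPb p ((hmem p).1 hp)
  have hperm : D.Perm E :=
    (List.perm_ext_iff_of_nodup hD (PySem.Set.nodup_ofList P)).2
      (fun x => (hmem x).trans (PySem.Set.mem_ofList P x).symm)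
  -- A's ss_list is the list of buckets
  set bkt : Nat → List Int := fun t => (P.filter (fun p => p.2 == (t : Int))).map (·.1) with hbkt
  set ssList := P.foldl (fun sl p => PySem.List.pySetD sl p.2 (PySem.List.pyGetD sl p.2 [] ++ [p.1]))
      (List.replicate n ([] : List Int)) with hss
  have hssLen : ssList.length = n := by
    rw [hss, pvFoldlLen _ (fun m x => PySem.List.length_pySetD _ _ _), List.length_replicate]
  have hssget : ∀ t, t < n → ssList.getD t [] = bkt t := by
    intro t ht
    rw [hss, pvBucket P _ (by intro p hp; simpa using (hPb p hp).2) t (by simpa using ht)]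
    rw [List.getD_replicate _ ht, List.nil_append]
  have hss_eq : ssList = (List.range n).map bkt := by
    apply List.ext_getElem (by simp [hssLen])
    intro i h1 h2
    have hi : i < n := by rwa [hssLen] at h1
    rw [← List.getD_eq_getElem ssList [] h1, hssget i hi, List.getElem_map, List.getElem_range]
  rw [hss_eq, List.foldl_map]
  -- B's count list counts the distinct reports of each target
  set count := D.foldl (fun c p => PySem.List.pySetD c p.2 (PySem.List.pyGetD c p.2 0 + 1))
      (List.replicate n (0 : Int)) with hcnt
  have hcLen : count.length = n := by
    rw [hcnt, pvFoldlLen _ (fun m x => PySem.List.length_pySetD _ _ _), List.length_replicate]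
  have hcount : ∀ p ∈ D, PySem.List.pyGetD count p.2 0 = ((D.map (·.2)).count p.2 : Int) := by
    intro p hp
    obtain ⟨-, h20, h2n⟩ := hDb p hp
    have h2c : p.2 < (count.length : Int) := by rw [hcLen]; exact h2n
    rw [PySem.List.pyGetD_eq_getElem _ _ h20 h2c]
    rw [← List.getD_eq_getElem _ 0 (by omega : p.2.toNat < count.length)]
    rw [hcnt, ← List.foldl_map (f := fun p : Int × Int => p.2)
        (g := fun c i => PySem.List.pySetD c i (PySem.List.pyGetD c i 0 + 1))]
    rw [pvIncFold (D.map (·.2)) _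
        (by intro i hi
            obtain ⟨q, hq, rfl⟩ := List.mem_map.1 hi
            simpa using (hDb q hq).2)
        p.2.toNat (by simp; omega)]
    rw [List.getD_replicate _ (by omega), Int.toNat_of_nonneg h20, zero_add]
  have hpg : ∀ p ∈ E, PySem.List.pyGetD count p.2 0 = (E.countP (fun q => q.2 == p.2) : Int) := by
    intro p hp
    have hpD : p ∈ D := (hmem p).2 ((PySem.Set.mem_ofList _ _).1 hp)
    rw [hcount p hpD, List.count_eq_countP, List.countP_map]
    have := hperm.countP_eq (fun q : Int × Int => q.2 == p.2)
    simpa using this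
  -- B's mail loop: keep only the qualifying pairs, then a plain increment loop
  rw [PySem.List.foldl_ite_eq_foldl_filter
      (fun p : Int × Int => k ≤ PySem.List.pyGetD count p.2 0)
      (fun m p => PySem.List.pySetD m p.1 (PySem.List.pyGetD m p.1 0 + 1)) D (List.replicate n 0)]
  set F := D.filter (fun p => decide (k ≤ PySem.List.pyGetD count p.2 0)) with hF
  rw [← List.foldl_map (f := fun p : Int × Int => p.1)
      (g := fun m i => PySem.List.pySetD m i (PySem.List.pyGetD m i 0 + 1))]
  -- slotwise comparison
  have hALen : ((List.range n).foldl (fun m t => pvMailStepA k m (bkt t)) (List.replicate n (0 : Int))).length = n := by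
    rw [pvFoldlLen _ (fun m x => pvMailStepALen _ _ _), List.length_replicate]
  have hBLen : ((F.map (·.1)).foldl (fun m i => PySem.List.pySetD m i (PySem.List.pyGetD m i 0 + 1)) (List.replicate n (0 : Int))).length = n := by
    rw [pvIncFoldLen, List.length_replicate]
  apply List.ext_getElem (by rw [hALen, hBLen])
  intro j h1 h2
  have hj : j < n := by rwa [hALen] at h1
  rw [← List.getD_eq_getElem _ 0 h1, ← List.getD_eq_getElem _ 0 h2]
  have hbktmem : ∀ (t : Nat) (i : Int), i ∈ PySem.Set.ofList (bkt t) → 0 ≤ i ∧ i < (n : Int) := by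
    intro t i hi
    have : i ∈ bkt t := (PySem.Set.mem_ofList _ _).1 hi
    obtain ⟨p, hp, rfl⟩ := List.mem_map.1 this
    exact (hPb p (List.mem_of_mem_filter hp)).1
  rw [pvMailFoldA k bkt (List.range n) _
      (by intro t _ i hi; simpa using hbktmem t i hi) j (by simpa using hj)]
  rw [pvIncFold (F.map (·.1)) _
      (by intro i hi
          obtain ⟨p, hp, rfl⟩ := List.mem_map.1 hi
          simpa using (hDb p (List.mem_of_mem_filter hp)).1)
      j (by simpa using hj)]
  rw [List.getD_replicate _ hj, zero_add, zero_add]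
  -- identify A's dedup'd buckets inside the distinct-pair set
  have hS : ∀ t : Nat, PySem.Set.ofList (bkt t) = (E.filter (fun p => p.2 == (t : Int))).map (·.1) := by
    intro t
    rw [hbkt]
    rw [pvOfListMapFst (P.filter (fun p => p.2 == (t : Int))) (t : Int)
        (fun p hp => by simpa using (List.mem_filter.1 hp).2)]
    rw [← pvOfListFilter]
  have hmemS : ∀ t : Nat, ((j : Int) ∈ PySem.Set.ofList (bkt t)) ↔ ((j : Int), (t : Int)) ∈ E := by
    intro t
    rw [hS]
    constructor
    · intro h
      obtain ⟨p, hp, h1⟩ := List.mem_map.1 h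
      obtain ⟨hpE, hp2⟩ := List.mem_filter.1 hp
      have h2 : p.2 = (t : Int) := by simpa using hp2
      have : p = ((j : Int), (t : Int)) := Prod.ext h1 h2
      rwa [← this]
    · intro h
      exact List.mem_map.2 ⟨((j : Int), (t : Int)), List.mem_filter.2 ⟨h, by simp⟩, rfl⟩
  have hlenS : ∀ t : Nat, ((PySem.Set.ofList (bkt t)).length : Int) = (E.countP (fun p => p.2 == (t : Int)) : Int) := by
    intro t
    rw [hS, List.length_map, List.countP_eq_length_filter]
  -- both sides count the same set of targets
  set pb : Nat → Bool := fun t =>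
    decide (k ≤ (E.countP (fun p => p.2 == (t : Int)) : Int)) && decide (((j : Int), (t : Int)) ∈ E) with hpb
  have hmapeq : (fun t => if k ≤ ((PySem.Set.ofList (bkt t)).length : Int) ∧ (j : Int) ∈ PySem.Set.ofList (bkt t) then (1 : Int) else 0)
      = fun t => if pb t = true then (1 : Int) else 0 := by
    funext t
    rw [hpb]
    by_cases h1 : k ≤ (E.countP (fun p => p.2 == (t : Int)) : Int) <;>
      by_cases h2 : ((j : Int), (t : Int)) ∈ E <;>
      simp [hlenS t, hmemS t, h1, h2]
  rw [hmapeq, PySem.List.sum_map_ite_one_zero pb (List.range n)]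
  rw [List.count_eq_countP, List.countP_map, hF, List.countP_filter]
  set q2 : Int × Int → Bool :=
    fun a => ((fun x => x == (j : Int)) ∘ fun x => x.1) a && decide (k ≤ PySem.List.pyGetD count a.2 0) with hq2
  have hq2perm := hperm.countP_eq q2
  rw [hq2perm]
  have key : List.countP pb (List.range n) = List.countP q2 E := by
    rw [List.countP_eq_length_filter, List.countP_eq_length_filter]
    have hGnd : ((List.range n).filter pb).Nodup := (List.nodup_range).filter _
    have hEnd : E.Nodup := PySem.Set.nodup_ofList P
    have hFnd : (E.filter q2).Nodup := hEnd.filter _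
    have hMnd : ((E.filter q2).map (fun p => p.2.toNat)).Nodup := by
      apply hFnd.map_on
      intro x hx y hy hxy
      obtain ⟨hxE, hxq⟩ := List.mem_filter.1 hx
      obtain ⟨hyE, hyq⟩ := List.mem_filter.1 hy
      simp only [hq2, Function.comp, Bool.and_eq_true, beq_iff_eq, decide_eq_true_eq] at hxq hyq
      have h0x := (hEb x hxE).2.1
      have h0y := (hEb y hyE).2.1
      have h2 : x.2 = y.2 := by omega
      exact Prod.ext (by rw [hxq.1, hyq.1]) h2
    have hmembers : ∀ t : Nat,
        t ∈ (List.range n).filter pb ↔ t ∈ (E.filter q2).map (fun p => p.2.toNat) := by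
      intro t
      simp only [List.mem_filter, List.mem_range, List.mem_map]
      constructor
      · rintro ⟨htn, hpbt⟩
        rw [hpb] at hpbt
        simp only [Bool.and_eq_true, decide_eq_true_eq] at hpbt
        obtain ⟨hk, hmm⟩ := hpbt
        refine ⟨((j : Int), (t : Int)), ⟨hmm, ?_⟩, by simp⟩
        simp only [hq2, Function.comp, Bool.and_eq_true, beq_iff_eq, decide_eq_true_eq]
        refine ⟨by simp, ?_⟩
        rw [hpg ((j : Int), (t : Int)) hmm]
        exact_mod_cast hk
      · rintro ⟨p, hpF, rfl⟩
        obtain ⟨hpE, hpq⟩ := hpF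
        simp only [hq2, Function.comp, Bool.and_eq_true, beq_iff_eq, decide_eq_true_eq] at hpq
        obtain ⟨hp1, hpk⟩ := hpq
        have hb := (hEb p hpE).2
        have hcast : ((p.2.toNat : Nat) : Int) = p.2 := Int.toNat_of_nonneg hb.1
        refine ⟨by omega, ?_⟩
        rw [hpb]
        simp only [Bool.and_eq_true, decide_eq_true_eq]
        constructor
        · rw [hpg p hpE] at hpk
          rw [hcast]
          exact_mod_cast hpk
        · have : ((j : Int), ((p.2.toNat : Nat) : Int)) = p := Prod.ext (by rw [hp1]) (by rw [hcast])
          rwa [this]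
    have hperm2 := (List.perm_ext_iff_of_nodup hGnd hMnd).2 hmembers
    rw [hperm2.length_eq, List.length_map]
  rw [key]

-- ===== VERDICT (by name: the statement is the Claim_ definition above) =====
theorem solution_spec : Claim_equal_solution := by
  intro idl rep k _hdom hpre
  unfold Spec_solution
  simp only [solution, solution_alt]
  rw [pvDicB_eq idl PySem.Dict.empty 0]
  rw [show (idl.foldl (fun (p : PySem.Dict String Int × Int) item => (p.1.insert item p.2, p.2 + 1)) (PySem.Dict.empty, 0)).1 = pvDicA idl from rfl]
  rw [pvPairsB_eq (pvDicA idl) rep []]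
  rw [List.nil_append]
  rw [show rep.filterMap (pvParse (pvDicA idl)) = pvPairs idl rep from rfl]
  rw [pvSorted2_eq]
  rw [pvPrevFold (fun c (p : Int × Int) => PySem.List.pySetD c p.2 (PySem.List.pyGetD c p.2 0 + 1))
        (PySem.List.sorted (pvPairs idl rep) (fun p => toLex p) false)
        (List.replicate idl.length (0 : Int)) none]
  rw [pvSsList_eq idl rep]
  rcases Nat.eq_zero_or_pos idl.length with hn0 | hn0
  · -- idl = []: Pre_ forces rep = [], and both programs return []
    have hidl : idl = [] := List.eq_nil_of_length_eq_zero hn0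
    subst hidl
    have hrep : rep = [] := by
      cases rep with
      | nil => rfl
      | cons r t =>
          obtain ⟨hlen, htok⟩ := hpre r List.mem_cons_self
          cases hs : PySem.Str.split₀ r with
          | nil => rw [hs] at hlen; simp at hlen
          | cons a u => exact absurd (htok a (by rw [hs]; exact List.mem_cons_self)) (by simp)
    subst hrep
    rfl
  · set D := pvDda (none : Option (Int × Int))
      (PySem.List.sorted (pvPairs idl rep) (fun p => toLex p) false) with hDdef
    have hPW : (PySem.List.sorted (pvPairs idl rep) (fun p => toLex p) false).Pairwise
        (fun a b => toLex a ≤ toLex b) := PySem.List.sorted_pairwise _ _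
    have hDn : D.Nodup :=
      (pvDda_nodup (fun p : Int × Int => toLex p) (fun a b h => toLex.injective h) _ none hPW
        (by intro x _ p hp; cases hp)).1
    have hDmem : ∀ p, p ∈ D ↔ p ∈ pvPairs idl rep := by
      intro p
      rw [hDdef, pvDda_mem_none, PySem.List.mem_sorted]
    rw [pvPrevFold (fun m (p : Int × Int) =>
          if k ≤ PySem.List.pyGetD (D.foldl
              (fun c (p : Int × Int) => PySem.List.pySetD c p.2 (PySem.List.pyGetD c p.2 0 + 1))
              (List.replicate idl.length (0 : Int))) p.2 0 then
            PySem.List.pySetD m p.1 (PySem.List.pyGetD m p.1 0 + 1)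
          else m)
        (PySem.List.sorted (pvPairs idl rep) (fun p => toLex p) false)
        (List.replicate idl.length (0 : Int)) none]
    exact pvCore (pvPairs idl rep) D idl.length
      (pvPairs_bound idl rep hn0) hDn hDmem k
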